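-- pv_equiv track=rewrite | github.com/Barkavirajan/Training | programs2.py | running_max
-- ===== SOURCE A (Python) =====
-- def running_max(lst):
--     result = []
--     current_max = 0
--     for i in lst:
--         if i <= 0:
--             current_max = 0
--         else:
--             current_max = max(current_max, i)
--         result.append(current_max)
--     return result
-- ===== SOURCE B (Python) =====
-- from itertools import accumulate
--
-- def running_max(lst):
--     out = []
--     n = len(lst)
--     i = 0
--     while i < n:
--         if lst[i] <= 0:
--             out.append(0)
--             i += 1
--         else:
--             j = i + 1
--             while j < n and lst[j] > 0:
--                 j += 1
--             out.extend(accumulate(lst[i:j], max))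
--             i = j
--     return out
-- ===== Notes on version B (the rewrite author's own statement) =====
-- stated objective: alternative
-- what changed: B splits the list into maximal runs of positive numbers separated by non-positive elements, outputs 0 at each separator and each run's prefix maxima via accumulate(max), instead of A's single fold with a reset-or-max branch.
import Mathlib
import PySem

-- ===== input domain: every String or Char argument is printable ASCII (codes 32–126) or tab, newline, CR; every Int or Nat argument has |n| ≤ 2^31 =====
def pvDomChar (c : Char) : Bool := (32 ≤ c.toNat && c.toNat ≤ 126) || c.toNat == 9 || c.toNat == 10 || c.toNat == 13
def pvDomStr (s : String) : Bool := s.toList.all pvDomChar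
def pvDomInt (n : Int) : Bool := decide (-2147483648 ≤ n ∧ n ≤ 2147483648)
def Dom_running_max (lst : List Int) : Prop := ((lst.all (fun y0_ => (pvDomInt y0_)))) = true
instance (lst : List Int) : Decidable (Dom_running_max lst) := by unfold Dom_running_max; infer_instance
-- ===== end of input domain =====

-- B segments the list into maximal positive runs separated by non-positives: 0 at each
-- separator, prefix maxima (accumulate(max)) inside each run; alternative decomposition, same cost.

-- ===== PORT A =====
-- A's loop: state = (result, current_max), appending after the reset/max branch.
def running_max (lst : List Int) : List Int :=
  (lst.foldl (fun (st : List Int × Int) i =>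
      let cm := if i ≤ 0 then 0 else max st.2 i
      (st.1 ++ [cm], cm)) ([], 0)).1

-- ===== PORT B =====
-- itertools.accumulate(seg, max) on a nonempty run: head, then running max.
def accMax (a : Int) : List Int → List Int
  | [] => [a]
  | x :: xs => a :: accMax (max a x) xs

-- outer while loop of Source B: at a non-positive element emit 0 and advance one; at a
-- positive element find the end of the positive run (takeWhile/dropWhile = the inner
-- while loop computing j) and emit the run's prefix maxima.
def running_max_alt : List Int → List Int
  | [] => []
  | x :: xs =>
    if x ≤ 0 then 0 :: running_max_alt xs
    else accMax x (xs.takeWhile (fun y => decide (0 < y)))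
         ++ running_max_alt (xs.dropWhile (fun y => decide (0 < y)))
termination_by l => l.length
decreasing_by
  · simp
  · have := List.length_dropWhile_le (fun y => decide (0 < y)) xs
    simp; omega

-- ===== PRECONDITION & SPEC =====
def Spec_running_max (lst : List Int) (out : List Int) : Prop := out = running_max_alt lst
instance (lst : List Int) (out : List Int) : Decidable (Spec_running_max lst out) := by unfold Spec_running_max; infer_instance

-- ===== CLAIM (what is proved, stated in full; the proofs are below) =====
def Claim_equal_running_max : Prop := ∀ (lst : List Int), Dom_running_max lst → Spec_running_max lst (running_max lst)

-- ===== LEMMAS AND PROOFS =====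
-- A's loop core with the result prefix generalized away.
def goA (cm : Int) (lst : List Int) : List Int :=
  (lst.foldl (fun (st : List Int × Int) i =>
      let cm := if i ≤ 0 then 0 else max st.2 i
      (st.1 ++ [cm], cm)) ([], cm)).1

theorem goA_pull (lst : List Int) : ∀ (res : List Int) (cm : Int),
    (lst.foldl (fun (st : List Int × Int) i =>
      let cm := if i ≤ 0 then 0 else max st.2 i
      (st.1 ++ [cm], cm)) (res, cm)).1 = res ++ goA cm lst := by
  induction lst with
  | nil => intro res cm; simp [goA]
  | cons x xs ih =>
    intro res cm
    simp only [List.foldl_cons, goA]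
    rw [ih, ih]
    simp

theorem goA_cons (x : Int) (xs : List Int) (cm : Int) :
    goA cm (x :: xs) =
      (if x ≤ 0 then 0 else max cm x) :: goA (if x ≤ 0 then 0 else max cm x) xs := by
  simp only [goA, List.foldl_cons]
  rw [goA_pull]
  simp [goA]

-- Inside a positive run, A's loop from a positive current max produces the run's
-- prefix maxima; `ih` handles the resumption after the run (a strictly shorter list).
theorem seg_lemma (N : Nat) (ih : ∀ l : List Int, l.length < N → goA 0 l = running_max_alt l) :
    ∀ (xs : List Int) (cm : Int), xs.length < N → 0 < cm →
      cm :: goA cm xs =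
        accMax cm (xs.takeWhile (fun y => decide (0 < y)))
          ++ running_max_alt (xs.dropWhile (fun y => decide (0 < y))) := by
  intro xs
  induction xs with
  | nil => intro cm _ _; simp [goA, accMax, running_max_alt]
  | cons y ys ihy =>
    intro cm hlen hcm
    by_cases hy : y ≤ 0
    · have hty : ¬ (0 < y) := by omega
      have h1 : (y :: ys).takeWhile (fun y => decide (0 < y)) = [] := by
        simp [hty]
      have h2 : (y :: ys).dropWhile (fun y => decide (0 < y)) = y :: ys := by
        simp [hty]
      have h3 : running_max_alt (y :: ys) = 0 :: running_max_alt ys := by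
        rw [running_max_alt]; simp [hy]
      rw [goA_cons, h1, h2, h3]
      simp only [hy, if_pos, accMax]
      have := ih ys (by simp at hlen ⊢; omega)
      simp [this]
    · have hty : (0 < y) := by omega
      have h1 : (y :: ys).takeWhile (fun y => decide (0 < y))
          = y :: ys.takeWhile (fun y => decide (0 < y)) := by
        simp [hty]
      have h2 : (y :: ys).dropWhile (fun y => decide (0 < y))
          = ys.dropWhile (fun y => decide (0 < y)) := by
        simp [hty]
      rw [goA_cons, h1, h2]
      simp only [hy, ite_false, accMax]
      have := ihy (max cm y) (by simp at hlen ⊢; omega) (by omega)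
      simp [this]

theorem goA_eq_alt : ∀ (N : Nat) (lst : List Int), lst.length ≤ N → goA 0 lst = running_max_alt lst := by
  intro N
  induction N with
  | zero =>
    intro lst h
    have : lst = [] := by cases lst <;> simp_all
    simp [this, goA, running_max_alt]
  | succ n ihN =>
    intro lst hlen
    cases lst with
    | nil => simp [goA, running_max_alt]
    | cons x xs =>
      by_cases hx : x ≤ 0
      · rw [goA_cons]
        simp only [hx, if_pos]
        rw [running_max_alt]
        simp only [hx, if_pos]
        have := ihN xs (by simp at hlen; omega)
        simp [this]
      · have hmax : max (0 : Int) x = x := by omega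
        rw [goA_cons]
        simp only [hx, ite_false, hmax]
        rw [running_max_alt]
        simp only [hx, ite_false]
        have hih : ∀ l : List Int, l.length < xs.length.succ → goA 0 l = running_max_alt l := by
          intro l hl
          exact ihN l (by simp at hlen; omega)
        have := seg_lemma xs.length.succ hih xs x (by omega) (by omega)
        exact this

-- ===== VERDICT (by name: the statement is the Claim_ definition above) =====
theorem running_max_spec : Claim_equal_running_max := by
  intro lst _
  unfold Spec_running_max running_max
  have : running_max_alt lst = goA 0 lst := (goA_eq_alt lst.length lst le_rfl).symm
  rw [this, goA]
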